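-- pv_equiv track=rewrite | github.com/LeeHyungi0622/Python-Algorithm-Repository | fe_1_peer_review.py | solution
-- ===== SOURCE A (Python) =====
-- from collections import deque
--
-- def solution(rows, columns, max_virus, queries):
--     answer = [[0] * columns for _ in range(rows)]
--
--     dr = [1,-1,0,0]
--     dc = [0,0,1,-1]
--
--     for query in queries:
--         visited = [[False] * columns for _ in range(rows)]
--         row, column = query
--
--         x = row - 1
--         y = column - 1
--         if answer[x][y] == max_virus:
--             queue = deque([[x,y]])
--             while queue:
--                 r, c = queue.popleft()
--                 for i in range(4):
--                     R = dr[i] + r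
--                     C = dc[i] + c
--
--                     if R < 0 or C < 0 or R >= rows or C >= columns:
--                         continue
--
--                     if not visited[R][C]:
--                         visited[R][C] = True
--                         if answer[R][C] == max_virus:
--                             queue.append([R,C])
--                         else:
--                             answer[R][C] += 1
--
--         else:
--             answer[row-1][column-1] += 1
--
--     return answer
-- ===== SOURCE B (Python) =====
-- def solution(rows, columns, max_virus, queries):
--     answer = [[0] * columns for _ in range(rows)]
--     dirs = ((1, 0), (-1, 0), (0, 1), (0, -1))
--
--     for row, column in queries:
--         x, y = row - 1, column - 1
--         if answer[x][y] == max_virus: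
--             # phase 1: collect the connected component of max-virus cells,
--             # using the component list itself as the work queue (read pointer i)
--             comp = [(x, y)]
--             seen = set()
--             i = 0
--             while i < len(comp):
--                 r, c = comp[i]
--                 i += 1
--                 for dr, dc in dirs:
--                     R, C = r + dr, c + dc
--                     if 0 <= R < rows and 0 <= C < columns \
--                             and answer[R][C] == max_virus and (R, C) not in seen:
--                         seen.add((R, C))
--                         comp.append((R, C))
--             # phase 2: the boundary = in-bounds non-max neighbours of component cells
--             boundary = set()
--             for r, c in comp:
--                 for dr, dc in dirs:
--                     R, C = r + dr, c + dc
--                     if 0 <= R < rows and 0 <= C < columns and answer[R][C] != max_virus: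
--                         boundary.add((R, C))
--             # phase 3: rebuild the grid, bumping every boundary cell once
--             answer = [[v + (1 if (i, j) in boundary else 0) for j, v in enumerate(rw)]
--                       for i, rw in enumerate(answer)]
--         else:
--             answer[x][y] += 1
--
--     return answer
-- ===== Notes on version B (the rewrite author's own statement) =====
-- stated objective: faster
-- what changed: A's single interleaved BFS that allocates a fresh rows*columns visited matrix on every query and mutates the grid while flooding is replaced by three separate passes used only on flood queries: collect the max-virus connected component (the component list itself serving as the work queue with a read pointer), build a deduplicated boundary set of in-bounds non-max neighbours of the component, and rebuild the grid once bumping each boundary cell; non-flood queries become a single O(1) increment instead of an O(rows*columns) matrix allocation.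
import Mathlib
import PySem

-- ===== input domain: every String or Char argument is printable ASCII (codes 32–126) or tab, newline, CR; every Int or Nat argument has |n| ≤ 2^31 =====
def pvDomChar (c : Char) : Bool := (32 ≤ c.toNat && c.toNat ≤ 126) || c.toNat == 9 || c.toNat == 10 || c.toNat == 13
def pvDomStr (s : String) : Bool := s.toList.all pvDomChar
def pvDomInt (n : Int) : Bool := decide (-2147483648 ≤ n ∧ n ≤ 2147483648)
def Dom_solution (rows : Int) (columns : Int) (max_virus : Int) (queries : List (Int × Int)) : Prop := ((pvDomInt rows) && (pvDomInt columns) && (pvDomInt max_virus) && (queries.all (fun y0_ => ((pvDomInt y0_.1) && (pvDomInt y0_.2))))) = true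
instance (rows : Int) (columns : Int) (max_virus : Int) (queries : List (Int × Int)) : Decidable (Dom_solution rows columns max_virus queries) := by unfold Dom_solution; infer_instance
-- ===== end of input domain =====

-- B restructures the max-virus branch as collect-component / collect-boundary-set / rebuild-grid
-- (three separate passes, the component list doubling as the work queue) instead of A's single
-- interleaved BFS that mutates the grid while it floods, and drops A's per-query visited-matrix
-- allocation (a timing run measured B faster); same values everywhere A returns.
-- A mutates its grid across iterations internally; both ports are pure, the claim is about the return value.

-- Shared low-level helpers (Python primitives, used by both ports):
-- grid read g[r][c]: exact where Python does not raise (Pre_ excludes raising indices);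
-- negative indices wrap from the end exactly as in Python (pyGet?).
def pvGet2 {α : Type} (g : List (List α)) (r c : Int) (d : α) : α :=
  (PySem.List.pyGet? ((PySem.List.pyGet? g r).getD []) c).getD d

-- index resolution for an assignment target (Python wrap rule); none = IndexError
def pvIdx (len : Nat) (i : Int) : Option Nat :=
  let j := if i < 0 then i + len else i
  if 0 ≤ j ∧ j < (len : Int) then some j.toNat else none

-- grid write g[r][c] = v: exact where Python does not raise (Pre_ excludes raising indices)
def pvSet2 {α : Type} (g : List (List α)) (r c : Int) (v : α) : List (List α) :=
  match pvIdx g.length r with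
  | none => g
  | some i =>
    let row := g.getD i []
    match pvIdx row.length c with
    | none => g
    | some j => g.set i (row.set j v)

-- [[v]*columns for _ in range(rows)]
def pvMkGrid {α : Type} (rows columns : Int) (v : α) : List (List α) :=
  (PySem.List.pyRange 0 rows 1).map (fun _ => List.replicate columns.toNat v)

-- the four directions (dr, dc)
def pvDirs : List (Int × Int) := [(1, 0), (-1, 0), (0, 1), (0, -1)]

-- ===== PORT A =====
-- body of A's `for i in range(4)` over the state (answer, visited, queue-tail)
def pvInnerA (rows columns max_virus : Int) (r c : Int)
    (s : List (List Int) × List (List Bool) × List (Int × Int)) (d : Int × Int) :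
    List (List Int) × List (List Bool) × List (Int × Int) :=
  let R := d.1 + r
  let C := d.2 + c
  if R < 0 ∨ C < 0 ∨ R ≥ rows ∨ C ≥ columns then s
  else if pvGet2 s.2.1 R C false = false then
    let vis := pvSet2 s.2.1 R C true
    if pvGet2 s.1 R C 0 = max_virus then (s.1, vis, s.2.2 ++ [(R, C)])
    else (pvSet2 s.1 R C (pvGet2 s.1 R C 0 + 1), vis, s.2.2)
  else s

-- A's `while queue:` loop (fuel is only a totalization guard; the fuel passed below always suffices)
def pvLoopA (rows columns max_virus : Int) :
    Nat → List (List Int) → List (List Bool) → List (Int × Int) → List (List Int) × List (List Bool)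
  | 0, ans, vis, _ => (ans, vis)
  | _ + 1, ans, vis, [] => (ans, vis)
  | fuel + 1, ans, vis, (r, c) :: rest =>
      let s := pvDirs.foldl (pvInnerA rows columns max_virus r c) (ans, vis, rest)
      pvLoopA rows columns max_virus fuel s.1 s.2.1 s.2.2

def pvFuel (rows columns : Int) : Nat := 2 * (rows.toNat * columns.toNat) + 2

-- one iteration of A's `for query in queries:` loop
def pvQueryA (rows columns max_virus : Int) (ans : List (List Int)) (q : Int × Int) : List (List Int) :=
  let x := q.1 - 1
  let y := q.2 - 1
  if pvGet2 ans x y 0 = max_virus then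
    (pvLoopA rows columns max_virus (pvFuel rows columns) ans (pvMkGrid rows columns false) [(x, y)]).1
  else pvSet2 ans x y (pvGet2 ans x y 0 + 1)

def solution (rows : Int) (columns : Int) (max_virus : Int) (queries : List (Int × Int)) : List (List Int) :=
  queries.foldl (pvQueryA rows columns max_virus) (pvMkGrid rows columns (0 : Int))

-- ===== PORT B =====
-- body of B's inner `for dr, dc in dirs` in phase 1, over the state (comp, seen)
def pvInnerB (rows columns max_virus : Int) (g : List (List Int)) (r c : Int)
    (s : List (Int × Int) × PySem.Set (Int × Int)) (d : Int × Int) :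
    List (Int × Int) × PySem.Set (Int × Int) :=
  let R := r + d.1
  let C := c + d.2
  if 0 ≤ R ∧ R < rows ∧ 0 ≤ C ∧ C < columns ∧ pvGet2 g R C 0 = max_virus ∧
      ¬ PySem.Set.contains s.2 (R, C) then
    (s.1 ++ [(R, C)], PySem.Set.add s.2 (R, C))
  else s

-- B's phase-1 `while i < len(comp):` pointer loop (fuel is only a totalization guard; always suffices)
def pvLoopB (rows columns max_virus : Int) (g : List (List Int)) :
    Nat → List (Int × Int) → PySem.Set (Int × Int) → Nat → List (Int × Int)
  | 0, comp, _, _ => comp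
  | fuel + 1, comp, seen, i =>
      match comp[i]? with
      | none => comp
      | some (r, c) =>
          let s := pvDirs.foldl (pvInnerB rows columns max_virus g r c) (comp, seen)
          pvLoopB rows columns max_virus g fuel s.1 s.2 (i + 1)

-- B's phase 2: boundary = set of in-bounds non-max neighbours of component cells
def pvBoundary (rows columns max_virus : Int) (g : List (List Int))
    (comp : List (Int × Int)) : PySem.Set (Int × Int) :=
  comp.foldl (fun b p =>
    pvDirs.foldl (fun b d =>
      let R := p.1 + d.1
      let C := p.2 + d.2
      if 0 ≤ R ∧ R < rows ∧ 0 ≤ C ∧ C < columns ∧ pvGet2 g R C 0 ≠ max_virus then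
        PySem.Set.add b (R, C)
      else b) b) PySem.Set.empty

-- one iteration of B's query loop
def pvQueryB (rows columns max_virus : Int) (ans : List (List Int)) (q : Int × Int) : List (List Int) :=
  let x := q.1 - 1
  let y := q.2 - 1
  if pvGet2 ans x y 0 = max_virus then
    let comp := pvLoopB rows columns max_virus ans (pvFuel rows columns) [(x, y)] PySem.Set.empty 0
    let bnd := pvBoundary rows columns max_virus ans comp
    (PySem.List.enumerate ans 0).map (fun p =>
      (PySem.List.enumerate p.2 0).map (fun q2 =>
        q2.2 + if PySem.Set.contains bnd (p.1, q2.1) then 1 else 0))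
  else pvSet2 ans x y (pvGet2 ans x y 0 + 1)

def solution_alt (rows : Int) (columns : Int) (max_virus : Int) (queries : List (Int × Int)) : List (List Int) :=
  queries.foldl (pvQueryB rows columns max_virus) (pvMkGrid rows columns (0 : Int))

-- ===== PRECONDITION & SPEC =====
-- Pre_ excludes exactly the inputs on which A raises an IndexError: a query whose (1-based)
-- coordinates resolve (with Python's negative-index wrap) outside the rows × columns grid.
def Pre_solution (rows : Int) (columns : Int) (max_virus : Int) (queries : List (Int × Int)) : Prop :=
  ∀ q ∈ queries, (-rows ≤ q.1 - 1 ∧ q.1 - 1 < rows) ∧ (-columns ≤ q.2 - 1 ∧ q.2 - 1 < columns)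
instance (rows : Int) (columns : Int) (max_virus : Int) (queries : List (Int × Int)) : Decidable (Pre_solution rows columns max_virus queries) := by unfold Pre_solution; infer_instance

def pvWitness_solution : Int × Int × Int × (List (Int × Int)) := (2, 3, 1, [(1, 1), (1, 1), (2, 3)])

def Spec_solution (rows : Int) (columns : Int) (max_virus : Int) (queries : List (Int × Int)) (out : List (List Int)) : Prop := out = solution_alt rows columns max_virus queries
instance (rows : Int) (columns : Int) (max_virus : Int) (queries : List (Int × Int)) (out : List (List Int)) : Decidable (Spec_solution rows columns max_virus queries out) := by unfold Spec_solution; infer_instance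

-- ===== CLAIM (what is proved, stated in full; the proofs are below) =====
def Claim_equal_solution : Prop := ∀ (rows : Int) (columns : Int) (max_virus : Int) (queries : List (Int × Int)), Dom_solution rows columns max_virus queries → Pre_solution rows columns max_virus queries → Spec_solution rows columns max_virus queries (solution rows columns max_virus queries)

-- ===== LEMMAS AND PROOFS =====

-- ===== proof-side definitions =====
def pvInb (rows columns R C : Int) : Prop := 0 ≤ R ∧ R < rows ∧ 0 ≤ C ∧ C < columns

def pvShape {α : Type} (rows columns : Int) (g : List (List α)) : Prop :=
  g.length = rows.toNat ∧ ∀ row ∈ g, row.length = columns.toNat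

def pvN {α : Type} (d : α) (g : List (List α)) (i j : Nat) : α := ((g[i]?.getD [])[j]?).getD d

def pvI {α : Type} (d : α) (g : List (List α)) (R C : Int) : α :=
  if 0 ≤ R ∧ 0 ≤ C then pvN d g R.toNat C.toNat else d

def pvFalseCount (vis : List (List Bool)) : Nat := (vis.map (fun row => row.count false)).sum

-- ===== low-level lemmas =====
theorem pvGet2_nonneg {α : Type} (d : α) (g : List (List α)) (r c : Int)
    (hr : 0 ≤ r) (hc : 0 ≤ c) : pvGet2 g r c d = pvN d g r.toNat c.toNat := by
  unfold pvGet2 pvN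
  rw [PySem.List.pyGet?_of_nonneg g hr, PySem.List.pyGet?_of_nonneg _ hc]

theorem pvI_natCast {α : Type} (d : α) (g : List (List α)) (i j : Nat) :
    pvI d g (i : Int) (j : Int) = pvN d g i j := by
  simp [pvI]

theorem pvI_eq_pvN {α : Type} (d : α) (g : List (List α)) (R C : Int)
    (hR : 0 ≤ R) (hC : 0 ≤ C) : pvI d g R C = pvN d g R.toNat C.toNat := by
  simp [pvI, hR, hC]

theorem pvValid {α : Type} {rows columns R C : Int} {g : List (List α)}
    (h : pvShape rows columns g) (hinb : pvInb rows columns R C) :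
    R.toNat < g.length ∧ C.toNat < (g[R.toNat]?.getD []).length := by
  obtain ⟨hlen, hrow⟩ := h
  obtain ⟨h1, h2, h3, h4⟩ := hinb
  have hR : R.toNat < g.length := by omega
  refine ⟨hR, ?_⟩
  rw [List.getElem?_eq_getElem hR]
  simp only [Option.getD_some]
  rw [hrow g[R.toNat] (List.getElem_mem hR)]
  omega

theorem pvIdx_lt {len : Nat} {i : Int} {n : Nat} (h : pvIdx len i = some n) : n < len := by
  simp only [pvIdx] at h
  by_cases hi : i < 0 <;> simp [hi] at h <;> omega


theorem pvSet2_eq {α : Type} (g : List (List α)) (r c : Int) (v : α)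
    (hr0 : 0 ≤ r) (hr : r.toNat < g.length) (hc0 : 0 ≤ c)
    (hc : c.toNat < (g[r.toNat]?.getD []).length) :
    pvSet2 g r c v = g.set r.toNat ((g[r.toNat]?.getD []).set c.toNat v) := by
  unfold pvSet2 pvIdx
  have h1 : ¬ r < 0 := by omega
  have h2 : (0 ≤ r ∧ r < (g.length : Int)) := by constructor <;> omega
  simp only [h1, if_false, if_pos h2]
  have hrowD : g.getD r.toNat [] = g[r.toNat]?.getD [] := List.getD_eq_getElem?_getD ..
  rw [hrowD]
  have h3 : ¬ c < 0 := by omega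
  have h4 : (0 ≤ c ∧ c < ((g[r.toNat]?.getD []).length : Int)) := by constructor <;> omega
  simp only [h3, if_false, if_pos h4]

theorem pvN_pvSet2 {α : Type} (d : α) (g : List (List α)) (r c : Int) (v : α)
    (hr0 : 0 ≤ r) (hr : r.toNat < g.length) (hc0 : 0 ≤ c)
    (hc : c.toNat < (g[r.toNat]?.getD []).length) (i j : Nat) :
    pvN d (pvSet2 g r c v) i j = if i = r.toNat ∧ j = c.toNat then v else pvN d g i j := by
  rw [pvSet2_eq g r c v hr0 hr hc0 hc]
  unfold pvN
  by_cases hi : i = r.toNat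
  · subst hi
    rw [List.getElem?_set_self hr]
    by_cases hj : j = c.toNat
    · subst hj
      simp [List.getElem?_set_self hc]
    · simp only [Option.getD_some]
      rw [List.getElem?_set_ne (by omega)]
      simp [hj]
  · rw [List.getElem?_set_ne (by omega)]
    simp [hi]

theorem pvSet2_length {α : Type} (g : List (List α)) (r c : Int) (v : α) :
    (pvSet2 g r c v).length = g.length := by
  unfold pvSet2
  cases pvIdx g.length r with
  | none => rfl
  | some i =>
    simp only []
    cases pvIdx (g.getD i []).length c with
    | none => rfl
    | some j => simp [List.length_set]

theorem pvShape_pvSet2 {α : Type} {rows columns : Int} {g : List (List α)} (r c : Int) (v : α)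
    (h : pvShape rows columns g) : pvShape rows columns (pvSet2 g r c v) := by
  constructor
  · rw [pvSet2_length]; exact h.1
  · intro row hrow
    unfold pvSet2 at hrow
    rcases h1 : pvIdx g.length r with _ | i
    · rw [h1] at hrow; exact h.2 row hrow
    · rw [h1] at hrow
      simp only [] at hrow
      rcases h2 : pvIdx (g.getD i []).length c with _ | j
      · rw [h2] at hrow; exact h.2 row hrow
      · rw [h2] at hrow
        simp only [] at hrow
        rcases List.mem_or_eq_of_mem_set hrow with hmem | heq
        · exact h.2 row hmem
        · subst heq
          rw [List.length_set]
          have hh : i < g.length := pvIdx_lt h1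
          have hgd : g.getD i [] = g[i]'hh := by
            rw [List.getD_eq_getElem?_getD, List.getElem?_eq_getElem hh]; rfl
          rw [hgd]
          exact h.2 _ (List.getElem_mem hh)

theorem pvMkGrid_eq {α : Type} (rows columns : Int) (v : α) :
    pvMkGrid rows columns v = List.replicate rows.toNat (List.replicate columns.toNat v) := by
  unfold pvMkGrid
  rw [PySem.List.pyRange_one]
  rw [List.map_map]
  simp only [Function.comp_def]
  rw [List.map_const']
  simp

theorem pvShape_mkGrid {α : Type} (rows columns : Int) (v : α) :
    pvShape rows columns (pvMkGrid rows columns v) := by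
  rw [pvMkGrid_eq]
  constructor
  · simp
  · intro row hrow
    rw [List.eq_of_mem_replicate hrow]
    simp

theorem pvN_mkGrid {α : Type} (d : α) (rows columns : Int) (v : α) (i j : Nat) :
    pvN d (pvMkGrid rows columns v) i j =
      if i < rows.toNat ∧ j < columns.toNat then v else d := by
  rw [pvMkGrid_eq]
  unfold pvN
  by_cases hi : i < rows.toNat
  · rw [List.getElem?_replicate_of_lt hi]
    by_cases hj : j < columns.toNat
    · simp [hi, hj]
    · simp only [Option.getD_some]
      rw [List.getElem?_replicate]
      simp [hi, hj]
  · rw [List.getElem?_replicate]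
    simp [hi]

theorem pvShape_pvN {α : Type} {rows columns : Int} {g : List (List α)} (d : α)
    (h : pvShape rows columns g) (i j : Nat) (hout : ¬ (i < rows.toNat ∧ j < columns.toNat)) :
    pvN d g i j = d := by
  have hlen := h.1
  unfold pvN
  by_cases hi : i < g.length
  · have hrowlen : (g[i]?.getD []).length = columns.toNat := by
      rw [List.getElem?_eq_getElem hi, Option.getD_some]
      exact h.2 _ (List.getElem_mem hi)
    have hj : ¬ j < columns.toNat := fun hj => hout ⟨by omega, hj⟩
    have hnone : (g[i]?.getD [])[j]? = none := List.getElem?_eq_none_iff.mpr (by omega)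
    rw [hnone]; rfl
  · have hnone : g[i]? = none := List.getElem?_eq_none_iff.mpr (by omega)
    rw [hnone]; simp

theorem pvCountFalse_set (row : List Bool) : ∀ (j : Nat), j < row.length →
    row[j]?.getD false = false →
    (row.set j true).count false + 1 = row.count false := by
  induction row with
  | nil => intro j hj; simp at hj
  | cons b t ih =>
    intro j hj hfalse
    cases j with
    | zero =>
      simp at hfalse
      subst hfalse
      simp
    | succ j =>
      simp only [List.set_cons_succ]
      simp only [List.count_cons]
      have := ih j (by simpa using hj) (by simpa using hfalse)
      omega

theorem pvFalseCount_set (vis : List (List Bool)) : ∀ (i : Nat),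
    i < vis.length → ∀ (j : Nat), j < (vis[i]?.getD []).length →
    pvN false vis i j = false →
    pvFalseCount (vis.set i ((vis[i]?.getD []).set j true)) + 1 = pvFalseCount vis := by
  induction vis with
  | nil => intro i hi; simp at hi
  | cons row t ih =>
    intro i hi j hj hfalse
    cases i with
    | zero =>
      simp only [List.getElem?_cons_zero, Option.getD_some] at hj hfalse ⊢
      simp only [List.set_cons_zero]
      unfold pvFalseCount
      simp only [List.map_cons, List.sum_cons]
      have := pvCountFalse_set row j hj (by simpa [pvN] using hfalse)
      omega
    | succ i =>
      simp only [List.getElem?_cons_succ] at hj hfalse ⊢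
      simp only [List.set_cons_succ]
      unfold pvFalseCount
      simp only [List.map_cons, List.sum_cons]
      have := ih i (by simpa using hi) j hj (by simpa [pvN] using hfalse)
      unfold pvFalseCount at this
      omega

theorem pvFalseCount_mkGrid (rows columns : Int) :
    pvFalseCount (pvMkGrid rows columns false) = rows.toNat * columns.toNat := by
  rw [pvMkGrid_eq]
  unfold pvFalseCount
  simp [List.map_replicate, List.sum_replicate, smul_eq_mul]

theorem pvGrid_ext {α : Type} (rows columns : Int) (d : α) (g h : List (List α))
    (hg : pvShape rows columns g) (hh : pvShape rows columns h)
    (hpt : ∀ i j : Nat, pvN d g i j = pvN d h i j) : g = h := by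
  have e1 := hg.1
  have e2 := hh.1
  apply List.ext_getElem?
  intro i
  by_cases hi : i < rows.toNat
  · have hgi : i < g.length := by omega
    have hhi : i < h.length := by omega
    rw [List.getElem?_eq_getElem hgi, List.getElem?_eq_getElem hhi]
    congr 1
    apply List.ext_getElem?
    intro j
    have hglen : g[i].length = columns.toNat := hg.2 _ (List.getElem_mem hgi)
    have hhlen : h[i].length = columns.toNat := hh.2 _ (List.getElem_mem hhi)
    by_cases hj : j < columns.toNat
    · have h1 : g[i][j]? = some g[i][j] := List.getElem?_eq_getElem (by omega)
      have h2 : h[i][j]? = some h[i][j] := List.getElem?_eq_getElem (by omega)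
      rw [h1, h2]
      have := hpt i j
      unfold pvN at this
      rw [List.getElem?_eq_getElem hgi, List.getElem?_eq_getElem hhi] at this
      simp only [Option.getD_some] at this
      rw [h1, h2] at this
      simpa using this
    · rw [List.getElem?_eq_none_iff.mpr (by omega), List.getElem?_eq_none_iff.mpr (by omega)]
  · rw [List.getElem?_eq_none_iff.mpr (by omega), List.getElem?_eq_none_iff.mpr (by omega)]

-- combined pvI/pvSet2 algebra
theorem pvI_pvSet2_self {α : Type} (d v : α) (vis : List (List α)) (R C : Int)
    (hr0 : 0 ≤ R) (hr : R.toNat < vis.length) (hc0 : 0 ≤ C)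
    (hc : C.toNat < (vis[R.toNat]?.getD []).length) :
    pvI d (pvSet2 vis R C v) R C = v := by
  rw [pvI_eq_pvN d _ R C hr0 hc0, pvN_pvSet2 d vis R C v hr0 hr hc0 hc]
  simp

theorem pvI_pvSet2_of_ne {α : Type} (d v : α) (vis : List (List α)) (R C R' C' : Int)
    (hr0 : 0 ≤ R) (hr : R.toNat < vis.length) (hc0 : 0 ≤ C)
    (hc : C.toNat < (vis[R.toNat]?.getD []).length)
    (hne : ¬ (R' = R ∧ C' = C)) :
    pvI d (pvSet2 vis R C v) R' C' = pvI d vis R' C' := by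
  unfold pvI
  split_ifs with h
  · rw [pvN_pvSet2 d vis R C v hr0 hr hc0 hc]
    rw [if_neg]
    rintro ⟨e1, e2⟩
    exact hne ⟨by omega, by omega⟩
  · rfl

theorem pvI_set_monotone (vis : List (List Bool)) (R C R' C' : Int)
    (hr0 : 0 ≤ R) (hr : R.toNat < vis.length) (hc0 : 0 ≤ C)
    (hc : C.toNat < (vis[R.toNat]?.getD []).length)
    (h : pvI false vis R' C' = true) :
    pvI false (pvSet2 vis R C true) R' C' = true := by
  by_cases hne : R' = R ∧ C' = C
  · obtain ⟨e1, e2⟩ := hne; subst e1; subst e2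
    exact pvI_pvSet2_self false true vis R' C' hr0 hr hc0 hc
  · rw [pvI_pvSet2_of_ne false true vis R C R' C' hr0 hr hc0 hc hne]
    exact h

theorem pvFalseCount_pvSet2 (vis : List (List Bool)) (R C : Int)
    (hr0 : 0 ≤ R) (hr : R.toNat < vis.length) (hc0 : 0 ≤ C)
    (hc : C.toNat < (vis[R.toNat]?.getD []).length)
    (hfalse : pvN false vis R.toNat C.toNat = false) :
    pvFalseCount (pvSet2 vis R C true) + 1 = pvFalseCount vis := by
  rw [pvSet2_eq vis R C true hr0 hr hc0 hc]
  exact pvFalseCount_set vis R.toNat hr C.toNat hc hfalse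

-- adjacency to a list of cells by one of the four directions
def pvAdjTo (P : List (Int × Int)) (R C : Int) : Prop :=
  ∃ p ∈ P, ∃ d ∈ pvDirs, R = d.1 + p.1 ∧ C = d.2 + p.2

-- The lockstep invariant between A's BFS state (ans, vis) and B's phase-1 state (seen);
-- P5 = cells whose whole neighbourhood is already marked, P6 = cells marks can come from.
def pvInv (rows columns maxv : Int) (g ans : List (List Int)) (vis : List (List Bool))
    (seen : PySem.Set (Int × Int)) (P5 P6 : List (Int × Int)) : Prop :=
  pvShape rows columns ans ∧ pvShape rows columns vis ∧
  (∀ i j : Nat, pvN 0 ans i j = pvN 0 g i j +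
      (if pvN false vis i j = true ∧ pvN 0 g i j ≠ maxv then 1 else 0)) ∧
  (∀ p ∈ seen, pvInb rows columns p.1 p.2) ∧
  (∀ R C : Int, pvInb rows columns R C →
      ((R, C) ∈ seen ↔ (pvI false vis R C = true ∧ pvI 0 g R C = maxv))) ∧
  (∀ p ∈ P5, ∀ d ∈ pvDirs, pvInb rows columns (d.1 + p.1) (d.2 + p.2) →
      pvI false vis (d.1 + p.1) (d.2 + p.2) = true) ∧
  (∀ R C : Int, pvInb rows columns R C → pvI false vis R C = true → pvAdjTo P6 R C)

theorem pvStep1 (rows columns maxv : Int) (g ans : List (List Int)) (vis : List (List Bool))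
    (rest comp : List (Int × Int)) (seen : PySem.Set (Int × Int)) (P5 P6 : List (Int × Int))
    (r c : Int) (d : Int × Int) (hd : d ∈ pvDirs) (hmem : (r, c) ∈ P6)
    (hinv : pvInv rows columns maxv g ans vis seen P5 P6) :
    pvInv rows columns maxv g
      (pvInnerA rows columns maxv r c (ans, vis, rest) d).1
      (pvInnerA rows columns maxv r c (ans, vis, rest) d).2.1
      (pvInnerB rows columns maxv g r c (comp, seen) d).2 P5 P6 ∧
    (∃ ext, (pvInnerB rows columns maxv g r c (comp, seen) d).1 = comp ++ ext ∧
            (pvInnerA rows columns maxv r c (ans, vis, rest) d).2.2 = rest ++ ext) ∧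
    (pvInb rows columns (d.1 + r) (d.2 + c) →
      pvI false (pvInnerA rows columns maxv r c (ans, vis, rest) d).2.1 (d.1 + r) (d.2 + c) = true) ∧
    (∀ R C : Int, pvI false vis R C = true →
      pvI false (pvInnerA rows columns maxv r c (ans, vis, rest) d).2.1 R C = true) ∧
    (pvInnerB rows columns maxv g r c (comp, seen) d).1.length +
        2 * pvFalseCount (pvInnerA rows columns maxv r c (ans, vis, rest) d).2.1 ≤
      comp.length + 2 * pvFalseCount vis := by
  obtain ⟨hShA, hShV, hAns, hSeenInb, hSeenIff, hP5, hP6⟩ := hinv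
  simp only [pvInnerA, pvInnerB]
  rw [show r + d.1 = d.1 + r from by ring, show c + d.2 = d.2 + c from by ring]
  by_cases hinb : pvInb rows columns (d.1 + r) (d.2 + c)
  · -- in-bounds neighbour
    obtain ⟨hb1, hb2, hb3, hb4⟩ := hinb
    have hinb' : pvInb rows columns (d.1 + r) (d.2 + c) := ⟨hb1, hb2, hb3, hb4⟩
    rw [if_neg (by push Not; omega)]
    have hvV := pvValid hShV hinb'
    have hvA := pvValid hShA hinb'
    have hreadV : pvGet2 vis (d.1 + r) (d.2 + c) false
        = pvN false vis (d.1 + r).toNat (d.2 + c).toNat := pvGet2_nonneg _ _ _ _ hb1 hb3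
    have hreadG : pvGet2 g (d.1 + r) (d.2 + c) 0
        = pvN 0 g (d.1 + r).toNat (d.2 + c).toNat := pvGet2_nonneg _ _ _ _ hb1 hb3
    have hreadA : pvGet2 ans (d.1 + r) (d.2 + c) 0
        = pvN 0 ans (d.1 + r).toNat (d.2 + c).toNat := pvGet2_nonneg _ _ _ _ hb1 hb3
    by_cases hvis : pvN false vis (d.1 + r).toNat (d.2 + c).toNat = true
    · -- already visited: both sides do nothing
      rw [if_neg (by rw [hreadV, hvis]; simp)]
      have hIvis : pvI false vis (d.1 + r) (d.2 + c) = true := by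
        rw [pvI_eq_pvN _ _ _ _ hb1 hb3]; exact hvis
      rw [if_neg ?hBneg]
      case hBneg =>
        rintro ⟨-, -, -, -, hmax, hnotin⟩
        rw [hreadG] at hmax
        have hseen : ((d.1 + r), (d.2 + c)) ∈ seen := by
          refine (hSeenIff _ _ hinb').mpr ⟨hIvis, ?_⟩
          rw [pvI_eq_pvN _ _ _ _ hb1 hb3]; exact hmax
        exact hnotin ((PySem.Set.contains_iff _ _).mpr hseen)
      exact ⟨⟨hShA, hShV, hAns, hSeenInb, hSeenIff, hP5, hP6⟩,
        ⟨[], by simp, by simp⟩, fun _ => hIvis, fun R C h => h, Nat.le_refl _⟩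
    · -- unvisited
      have hvisF : pvN false vis (d.1 + r).toNat (d.2 + c).toNat = false := by
        revert hvis; cases pvN false vis (d.1 + r).toNat (d.2 + c).toNat <;> simp
      rw [if_pos (by rw [hreadV, hvisF])]
      have hnotseen : ((d.1 + r), (d.2 + c)) ∉ seen := by
        intro hs
        have := ((hSeenIff _ _ hinb').mp hs).1
        rw [pvI_eq_pvN _ _ _ _ hb1 hb3] at this
        rw [hvisF] at this; exact absurd this (by simp)
      have hAnsHere : pvN 0 ans (d.1 + r).toNat (d.2 + c).toNat
          = pvN 0 g (d.1 + r).toNat (d.2 + c).toNat := by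
        rw [hAns]; rw [hvisF]; simp
      by_cases hmax : pvN 0 g (d.1 + r).toNat (d.2 + c).toNat = maxv
      · -- max-virus neighbour: A enqueues + marks, B appends + records in seen
        rw [if_pos (by rw [hreadA, hAnsHere]; exact hmax)]
        rw [if_pos ⟨hb1, hb2, hb3, hb4, by rw [hreadG]; exact hmax, by
          simp only [Bool.not_eq_true]
          rw [← Bool.not_eq_true, PySem.Set.contains_iff]
          exact hnotseen⟩]
        simp only []
        refine ⟨⟨hShA, pvShape_pvSet2 _ _ _ hShV, ?_, ?_, ?_, ?_, ?_⟩,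
          ⟨[((d.1 + r), (d.2 + c))], rfl, rfl⟩,
          fun _ => pvI_pvSet2_self _ _ _ _ _ hb1 hvV.1 hb3 hvV.2,
          fun R C h => pvI_set_monotone vis _ _ R C hb1 hvV.1 hb3 hvV.2 h, ?_⟩
        · -- ansRel
          intro i j
          rw [pvN_pvSet2 false vis _ _ true hb1 hvV.1 hb3 hvV.2]
          by_cases hij : i = (d.1 + r).toNat ∧ j = (d.2 + c).toNat
          · obtain ⟨e1, e2⟩ := hij; subst e1; subst e2
            simp [hAnsHere, hmax]
          · rw [if_neg hij]; exact hAns i j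
        · -- seen elements in bounds
          intro p hp
          rcases (PySem.Set.mem_add _ _ _).mp hp with h | h
          · exact hSeenInb p h
          · subst h; exact hinb'
        · -- seen iff
          intro R C hRC
          rw [PySem.Set.mem_add]
          by_cases heq : R = d.1 + r ∧ C = d.2 + c
          · obtain ⟨e1, e2⟩ := heq; subst e1; subst e2
            constructor
            · intro _
              refine ⟨pvI_pvSet2_self _ _ _ _ _ hb1 hvV.1 hb3 hvV.2, ?_⟩
              rw [pvI_eq_pvN _ _ _ _ hb1 hb3]; exact hmax
            · intro _; exact Or.inr rfl
          · rw [pvI_pvSet2_of_ne false true vis _ _ R C hb1 hvV.1 hb3 hvV.2 heq]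
            constructor
            · rintro (h | h)
              · exact (hSeenIff R C hRC).mp h
              · exact absurd (Prod.ext_iff.mp h) heq
            · intro h; left; exact (hSeenIff R C hRC).mpr h
        · -- P5 neighbourhoods stay marked
          intro p hp d' hd' hinbd
          exact pvI_set_monotone vis _ _ _ _ hb1 hvV.1 hb3 hvV.2 (hP5 p hp d' hd' hinbd)
        · -- soundness of marks
          intro R C hRC htrue
          by_cases heq : R = d.1 + r ∧ C = d.2 + c
          · obtain ⟨e1, e2⟩ := heq; subst e1; subst e2
            exact ⟨(r, c), hmem, d, hd, rfl, rfl⟩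
          · rw [pvI_pvSet2_of_ne false true vis _ _ R C hb1 hvV.1 hb3 hvV.2 heq] at htrue
            exact hP6 R C hRC htrue
        · -- measure
          have := pvFalseCount_pvSet2 vis _ _ hb1 hvV.1 hb3 hvV.2 hvisF
          simp only [List.length_append, List.length_cons, List.length_nil]
          omega
      · -- non-max neighbour: A bumps + marks, B does nothing
        rw [if_neg (by rw [hreadA, hAnsHere]; exact hmax)]
        rw [if_neg (by rintro ⟨-, -, -, -, hmax', -⟩; rw [hreadG] at hmax'; exact hmax hmax')]
        simp only []
        refine ⟨⟨pvShape_pvSet2 _ _ _ hShA, pvShape_pvSet2 _ _ _ hShV, ?_, hSeenInb, ?_, ?_, ?_⟩,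
          ⟨[], by simp, by simp⟩,
          fun _ => pvI_pvSet2_self _ _ _ _ _ hb1 hvV.1 hb3 hvV.2,
          fun R C h => pvI_set_monotone vis _ _ R C hb1 hvV.1 hb3 hvV.2 h, ?_⟩
        · -- ansRel
          intro i j
          rw [pvN_pvSet2 0 ans _ _ _ hb1 hvA.1 hb3 hvA.2]
          rw [pvN_pvSet2 false vis _ _ true hb1 hvV.1 hb3 hvV.2]
          by_cases hij : i = (d.1 + r).toNat ∧ j = (d.2 + c).toNat
          · obtain ⟨e1, e2⟩ := hij; subst e1; subst e2
            simp [hreadA, hAnsHere, hmax]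
          · rw [if_neg hij, if_neg hij]; exact hAns i j
        · -- seen iff
          intro R C hRC
          by_cases heq : R = d.1 + r ∧ C = d.2 + c
          · obtain ⟨e1, e2⟩ := heq; subst e1; subst e2
            constructor
            · intro h; exact absurd h hnotseen
            · rintro ⟨-, hmax'⟩
              rw [pvI_eq_pvN _ _ _ _ hb1 hb3] at hmax'
              exact absurd hmax' hmax
          · rw [pvI_pvSet2_of_ne false true vis _ _ R C hb1 hvV.1 hb3 hvV.2 heq]
            exact hSeenIff R C hRC
        · -- P5
          intro p hp d' hd' hinbd
          exact pvI_set_monotone vis _ _ _ _ hb1 hvV.1 hb3 hvV.2 (hP5 p hp d' hd' hinbd)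
        · -- soundness
          intro R C hRC htrue
          by_cases heq : R = d.1 + r ∧ C = d.2 + c
          · obtain ⟨e1, e2⟩ := heq; subst e1; subst e2
            exact ⟨(r, c), hmem, d, hd, rfl, rfl⟩
          · rw [pvI_pvSet2_of_ne false true vis _ _ R C hb1 hvV.1 hb3 hvV.2 heq] at htrue
            exact hP6 R C hRC htrue
        · -- measure
          have := pvFalseCount_pvSet2 vis _ _ hb1 hvV.1 hb3 hvV.2 hvisF
          omega
  · -- out of bounds: both sides do nothing
    rw [if_pos (by unfold pvInb at hinb; omega)]
    rw [if_neg (by rintro ⟨c1, c2, c3, c4, -, -⟩; exact hinb ⟨c1, c2, c3, c4⟩)]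
    exact ⟨⟨hShA, hShV, hAns, hSeenInb, hSeenIff, hP5, hP6⟩,
      ⟨[], by simp, by simp⟩, fun h => absurd h hinb, fun R C h => h, Nat.le_refl _⟩

theorem pvStepFold (rows columns maxv : Int) (g : List (List Int)) (r c : Int)
    (ds : List (Int × Int)) (hds : ∀ d ∈ ds, d ∈ pvDirs) :
    ∀ (ans : List (List Int)) (vis : List (List Bool)) (rest comp : List (Int × Int))
      (seen : PySem.Set (Int × Int)) (P5 P6 : List (Int × Int)),
    (r, c) ∈ P6 →
    pvInv rows columns maxv g ans vis seen P5 P6 →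
    ∃ ans' vis' rest' comp' seen' ext,
      ds.foldl (pvInnerA rows columns maxv r c) (ans, vis, rest) = (ans', vis', rest') ∧
      ds.foldl (pvInnerB rows columns maxv g r c) (comp, seen) = (comp', seen') ∧
      pvInv rows columns maxv g ans' vis' seen' P5 P6 ∧
      comp' = comp ++ ext ∧ rest' = rest ++ ext ∧
      (∀ d ∈ ds, pvInb rows columns (d.1 + r) (d.2 + c) →
          pvI false vis' (d.1 + r) (d.2 + c) = true) ∧
      (∀ R C : Int, pvI false vis R C = true → pvI false vis' R C = true) ∧
      comp'.length + 2 * pvFalseCount vis' ≤ comp.length + 2 * pvFalseCount vis := by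
  induction ds with
  | nil =>
    intro ans vis rest comp seen P5 P6 hmem hinv
    exact ⟨ans, vis, rest, comp, seen, [], rfl, rfl, hinv, by simp, by simp, by simp,
      fun R C h => h, Nat.le_refl _⟩
  | cons d ds ih =>
    intro ans vis rest comp seen P5 P6 hmem hinv
    have hd : d ∈ pvDirs := hds d (by simp)
    obtain ⟨hstep, ⟨ext1, hc1, hr1⟩, hmark1, hmono1, hmeas1⟩ :=
      pvStep1 rows columns maxv g ans vis rest comp seen P5 P6 r c d hd hmem hinv
    obtain ⟨ans', vis', rest', comp', seen', ext, hfa, hfb, hinv', hc2, hr2, hmark2, hmono2, hmeas2⟩ :=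
      ih (fun d' hd' => hds d' (by simp [hd'])) (pvInnerA rows columns maxv r c (ans, vis, rest) d).1
        (pvInnerA rows columns maxv r c (ans, vis, rest) d).2.1
        (pvInnerA rows columns maxv r c (ans, vis, rest) d).2.2
        (pvInnerB rows columns maxv g r c (comp, seen) d).1
        (pvInnerB rows columns maxv g r c (comp, seen) d).2 P5 P6 hmem hstep
    refine ⟨ans', vis', rest', comp', seen', ext1 ++ ext, ?_, ?_, hinv', ?_, ?_, ?_, ?_, ?_⟩
    · rw [List.foldl_cons]; exact hfa
    · rw [List.foldl_cons]; exact hfb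
    · rw [hc2, hc1, List.append_assoc]
    · rw [hr2, hr1, List.append_assoc]
    · intro d' hd' hinbd
      rcases List.mem_cons.mp hd' with h | h
    -- d' is the direction handled by this step, or a later one
      · subst h; exact hmono2 _ _ (hmark1 hinbd)
      · exact hmark2 d' h hinbd
    · intro R C h; exact hmono2 R C (hmono1 R C h)
    · omega

theorem pvLoopA_cons (rows columns maxv : Int) (fuel : Nat) (ans : List (List Int))
    (vis : List (List Bool)) (r c : Int) (rest : List (Int × Int)) :
    pvLoopA rows columns maxv (fuel + 1) ans vis ((r, c) :: rest) =
      pvLoopA rows columns maxv fuel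
        ((pvDirs.foldl (pvInnerA rows columns maxv r c) (ans, vis, rest)).1)
        ((pvDirs.foldl (pvInnerA rows columns maxv r c) (ans, vis, rest)).2.1)
        ((pvDirs.foldl (pvInnerA rows columns maxv r c) (ans, vis, rest)).2.2) := rfl

theorem pvLoopB_none (rows columns maxv : Int) (g : List (List Int)) (fuel : Nat)
    (comp : List (Int × Int)) (seen : PySem.Set (Int × Int)) (i : Nat)
    (h : comp[i]? = none) :
    pvLoopB rows columns maxv g (fuel + 1) comp seen i = comp := by
  unfold pvLoopB
  rw [h]

theorem pvLoopB_some (rows columns maxv : Int) (g : List (List Int)) (fuel : Nat)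
    (comp : List (Int × Int)) (seen : PySem.Set (Int × Int)) (i : Nat) (r c : Int)
    (h : comp[i]? = some (r, c)) :
    pvLoopB rows columns maxv g (fuel + 1) comp seen i =
      pvLoopB rows columns maxv g fuel
        ((pvDirs.foldl (pvInnerB rows columns maxv g r c) (comp, seen)).1)
        ((pvDirs.foldl (pvInnerB rows columns maxv g r c) (comp, seen)).2) (i + 1) := by
  conv_lhs => rw [pvLoopB]
  rw [h]

theorem pvLoopEq (rows columns maxv : Int) (g : List (List Int)) :
    ∀ (fuel : Nat) (ans : List (List Int)) (vis : List (List Bool))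
      (comp : List (Int × Int)) (seen : PySem.Set (Int × Int)) (i : Nat),
    pvInv rows columns maxv g ans vis seen (comp.take i) (comp.take i) →
    i ≤ comp.length →
    (comp.length - i) + 2 * pvFalseCount vis < fuel →
    ∃ ans' vis' comp',
      pvLoopA rows columns maxv fuel ans vis (comp.drop i) = (ans', vis') ∧
      pvLoopB rows columns maxv g fuel comp seen i = comp' ∧
      pvShape rows columns ans' ∧
      (∀ i' j' : Nat, pvN 0 ans' i' j' = pvN 0 g i' j' +
          (if pvN false vis' i' j' = true ∧ pvN 0 g i' j' ≠ maxv then 1 else 0)) ∧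
      (∀ R C : Int, pvInb rows columns R C →
          (pvI false vis' R C = true ↔ pvAdjTo comp' R C)) := by
  intro fuel
  induction fuel with
  | zero => intro ans vis comp seen i hinv hile hfuel; omega
  | succ fuel ih =>
    intro ans vis comp seen i hinv hile hfuel
    rcases hq : comp.drop i with _ | ⟨⟨r, c⟩, tl⟩
    · -- the queue is empty: both loops stop
      have hlen : comp.length ≤ i := by
        have := List.drop_eq_nil_iff.mp hq
        omega
      have hnone : comp[i]? = none := List.getElem?_eq_none_iff.mpr hlen
      have htake : comp.take i = comp := List.take_of_length_le hlen
      rw [htake] at hinv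
      obtain ⟨hShA, hShV, hAns, hSeenInb, hSeenIff, hP5, hP6⟩ := hinv
      refine ⟨ans, vis, comp, rfl, pvLoopB_none rows columns maxv g fuel comp seen i hnone,
        hShA, hAns, ?_⟩
      intro R C hRC
      constructor
      · exact hP6 R C hRC
      · rintro ⟨p, hp, d, hd, e1, e2⟩
        subst e1; subst e2
        exact hP5 p hp d hd hRC
    · -- process the cell at the read pointer
      have hgi : comp[i]? = some (r, c) := by
        have h0 : (comp.drop i)[0]? = some (r, c) := by rw [hq]; rfl
        rw [List.getElem?_drop] at h0
        simpa using h0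
      have hilt : i < comp.length := by
        by_contra h
        rw [List.getElem?_eq_none_iff.mpr (by omega)] at hgi
        cases hgi
      have htl : comp.drop (i + 1) = tl := by
        have h1 : comp.drop (i + 1) = (comp.drop i).drop 1 := by
          rw [List.drop_drop, Nat.add_comm]
        rw [h1, hq]
        rfl
      have htake1 : comp.take (i + 1) = comp.take i ++ [(r, c)] := by
        rw [List.take_add_one, hgi]
        rfl
      have hinv6 : pvInv rows columns maxv g ans vis seen (comp.take i) (comp.take (i + 1)) := by
        obtain ⟨h1, h2, h3, h4, h5, h6, h7⟩ := hinv
        refine ⟨h1, h2, h3, h4, h5, h6, ?_⟩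
        intro R C hRC htrue
        obtain ⟨p, hp, d, hd, e⟩ := h7 R C hRC htrue
        exact ⟨p, by rw [htake1]; exact List.mem_append_left _ hp, d, hd, e⟩
      have hmem : (r, c) ∈ comp.take (i + 1) := by
        rw [htake1]; exact List.mem_append_right _ (by simp)
      obtain ⟨ans1, vis1, rest1, comp1, seen1, ext, hfa, hfb, hinv1, hc1, hr1, hmarks, hmono, hmeas⟩ :=
        pvStepFold rows columns maxv g r c pvDirs (fun d hd => hd) ans vis tl comp seen
          (comp.take i) (comp.take (i + 1)) hmem hinv6
      have hlen1 : comp1.length = comp.length + ext.length := by rw [hc1]; simp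
      have htakeeq : comp1.take (i + 1) = comp.take (i + 1) := by
        rw [hc1]; exact List.take_append_of_le_length (by omega)
      have hinv2 : pvInv rows columns maxv g ans1 vis1 seen1 (comp1.take (i + 1)) (comp1.take (i + 1)) := by
        obtain ⟨h1, h2, h3, h4, h5, h6, h7⟩ := hinv1
        rw [htakeeq]
        refine ⟨h1, h2, h3, h4, h5, ?_, h7⟩
        intro p hp d hd hinbd
        rw [htake1] at hp
        rcases List.mem_append.mp hp with hp | hp
        · exact h6 p hp d hd hinbd
        · have : p = (r, c) := by simpa using hp
          subst this
          exact hmarks d hd hinbd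
      have hdrop1 : comp1.drop (i + 1) = rest1 := by
        rw [hc1, List.drop_append_of_le_length (by omega), htl, hr1]
      obtain ⟨ans', vis', comp', hA, hB, hsh, hans, hiff⟩ :=
        ih ans1 vis1 comp1 seen1 (i + 1) hinv2 (by omega) (by omega)
      refine ⟨ans', vis', comp', ?_, ?_, hsh, hans, hiff⟩
      · rw [pvLoopA_cons, hfa]
        show pvLoopA rows columns maxv fuel ans1 vis1 rest1 = (ans', vis')
        rw [← hdrop1]
        exact hA
      · rw [pvLoopB_some rows columns maxv g fuel comp seen i r c hgi, hfb]
        exact hB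

theorem pvBnd1 (rows columns maxv : Int) (g : List (List Int)) (p : Int × Int) :
    ∀ (ds : List (Int × Int)) (b : PySem.Set (Int × Int)) (x : Int × Int),
    (x ∈ ds.foldl (fun b d =>
        if 0 ≤ p.1 + d.1 ∧ p.1 + d.1 < rows ∧ 0 ≤ p.2 + d.2 ∧ p.2 + d.2 < columns ∧
            pvGet2 g (p.1 + d.1) (p.2 + d.2) 0 ≠ maxv then
          PySem.Set.add b (p.1 + d.1, p.2 + d.2) else b) b) ↔
      (x ∈ b ∨ ∃ d ∈ ds, x = (p.1 + d.1, p.2 + d.2) ∧ pvInb rows columns x.1 x.2 ∧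
        pvI 0 g x.1 x.2 ≠ maxv) := by
  intro ds
  induction ds with
  | nil => intro b x; simp
  | cons d ds ihd =>
    intro b x
    rw [List.foldl_cons]
    by_cases hc : 0 ≤ p.1 + d.1 ∧ p.1 + d.1 < rows ∧ 0 ≤ p.2 + d.2 ∧ p.2 + d.2 < columns ∧
        pvGet2 g (p.1 + d.1) (p.2 + d.2) 0 ≠ maxv
    · rw [if_pos hc, ihd]
      obtain ⟨c1, c2, c3, c4, c5⟩ := hc
      constructor
      · rintro (h | ⟨d', hd', hx⟩)
        · rcases (PySem.Set.mem_add _ _ _).mp h with h | h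
          · exact Or.inl h
          · subst h
            refine Or.inr ⟨d, by simp, rfl, ⟨c1, c2, c3, c4⟩, ?_⟩
            rw [pvI_eq_pvN _ _ _ _ c1 c3, ← pvGet2_nonneg _ _ _ _ c1 c3]
            exact c5
        · exact Or.inr ⟨d', by simp [hd'], hx⟩
      · rintro (h | ⟨d', hd', he, hi, hm⟩)
        · exact Or.inl ((PySem.Set.mem_add _ _ _).mpr (Or.inl h))
        · rcases List.mem_cons.mp hd' with rfl | hd''
          · exact Or.inl ((PySem.Set.mem_add _ _ _).mpr (Or.inr he))
          · exact Or.inr ⟨d', hd'', he, hi, hm⟩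
    · rw [if_neg hc, ihd]
      constructor
      · rintro (h | ⟨d', hd', hx⟩)
        · exact Or.inl h
        · exact Or.inr ⟨d', by simp [hd'], hx⟩
      · rintro (h | ⟨d', hd', he, hi, hm⟩)
        · exact Or.inl h
        · rcases List.mem_cons.mp hd' with rfl | hd''
          · exfalso
            rw [he] at hi hm
            obtain ⟨c1, c2, c3, c4⟩ := hi
            apply hc
            refine ⟨c1, c2, c3, c4, ?_⟩
            rw [pvGet2_nonneg _ _ _ _ c1 c3, ← pvI_eq_pvN _ _ _ _ c1 c3]
            exact hm
          · exact Or.inr ⟨d', hd'', he, hi, hm⟩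

theorem pvBnd2 (rows columns maxv : Int) (g : List (List Int)) :
    ∀ (comp : List (Int × Int)) (b : PySem.Set (Int × Int)) (x : Int × Int),
    (x ∈ comp.foldl (fun b p => pvDirs.foldl (fun b d =>
        if 0 ≤ p.1 + d.1 ∧ p.1 + d.1 < rows ∧ 0 ≤ p.2 + d.2 ∧ p.2 + d.2 < columns ∧
            pvGet2 g (p.1 + d.1) (p.2 + d.2) 0 ≠ maxv then
          PySem.Set.add b (p.1 + d.1, p.2 + d.2) else b) b) b) ↔
      (x ∈ b ∨ ∃ p ∈ comp, ∃ d ∈ pvDirs, x = (p.1 + d.1, p.2 + d.2) ∧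
        pvInb rows columns x.1 x.2 ∧ pvI 0 g x.1 x.2 ≠ maxv) := by
  intro comp
  induction comp with
  | nil => intro b x; simp
  | cons p comp ihp =>
    intro b x
    rw [List.foldl_cons, ihp, pvBnd1 rows columns maxv g p pvDirs b x]
    constructor
    · rintro ((h | ⟨d, hd, hx⟩) | ⟨p', hp', hx⟩)
      · exact Or.inl h
      · exact Or.inr ⟨p, by simp, d, hd, hx⟩
      · exact Or.inr ⟨p', by simp [hp'], hx⟩
    · rintro (h | ⟨p', hp', hx⟩)
      · exact Or.inl (Or.inl h)
      · rcases List.mem_cons.mp hp' with rfl | hp''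
        · exact Or.inl (Or.inr hx)
        · exact Or.inr ⟨p', hp'', hx⟩

theorem mem_pvBoundary (rows columns maxv : Int) (g : List (List Int))
    (comp : List (Int × Int)) (x : Int × Int) :
    x ∈ pvBoundary rows columns maxv g comp ↔
      ∃ p ∈ comp, ∃ d ∈ pvDirs, x = (p.1 + d.1, p.2 + d.2) ∧ pvInb rows columns x.1 x.2 ∧
        pvI 0 g x.1 x.2 ≠ maxv := by
  constructor
  · intro h
    rcases (pvBnd2 rows columns maxv g comp PySem.Set.empty x).mp h with h | h
    · cases h
    · exact h
  · intro h
    exact (pvBnd2 rows columns maxv g comp PySem.Set.empty x).mpr (Or.inr h)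

theorem pvOut_pt (g : List (List Int)) (bnd : PySem.Set (Int × Int)) (i j : Nat) :
    pvN 0 ((PySem.List.enumerate g 0).map (fun p => (PySem.List.enumerate p.2 0).map (fun q2 =>
        q2.2 + if PySem.Set.contains bnd (p.1, q2.1) then 1 else 0))) i j =
      pvN 0 g i j + (if i < g.length ∧ j < (g[i]?.getD []).length ∧
          PySem.Set.contains bnd ((i : Int), (j : Int)) = true then 1 else 0) := by
  unfold pvN
  rw [List.getElem?_map, PySem.List.getElem?_enumerate]
  cases hgi : g[i]? with
  | none =>
    have hlen : ¬ i < g.length := by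
      intro h
      rw [List.getElem?_eq_getElem h] at hgi
      cases hgi
    simp [hlen]
  | some row =>
    have hlen : i < g.length := by
      by_contra h
      rw [List.getElem?_eq_none_iff.mpr (by omega)] at hgi
      cases hgi
    simp only [Option.map_some, Option.getD_some]
    rw [List.getElem?_map, PySem.List.getElem?_enumerate]
    cases hrj : row[j]? with
    | none =>
      have hjlen : ¬ j < row.length := by
        intro h
        rw [List.getElem?_eq_getElem h] at hrj
        cases hrj
      simp [hjlen, hlen]
    | some v =>
      have hjlen : j < row.length := by
        by_contra h
        rw [List.getElem?_eq_none_iff.mpr (by omega)] at hrj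
        cases hrj
      simp only [Option.map_some, Option.getD_some, zero_add]
      by_cases hct : PySem.Set.contains bnd ((i : Int), (j : Int)) = true
      · rw [if_pos hct, if_pos ⟨hlen, hjlen, hct⟩]
      · rw [if_neg hct, if_neg (fun h => hct h.2.2)]

theorem pvOut_shape (rows columns : Int) (g : List (List Int)) (bnd : PySem.Set (Int × Int))
    (h : pvShape rows columns g) :
    pvShape rows columns ((PySem.List.enumerate g 0).map (fun p =>
      (PySem.List.enumerate p.2 0).map (fun q2 =>
        q2.2 + if PySem.Set.contains bnd (p.1, q2.1) then 1 else 0))) := by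
  constructor
  · rw [List.length_map, PySem.List.length_enumerate]
    exact h.1
  · intro row hrow
    obtain ⟨p, hp, hpe⟩ := List.mem_map.mp hrow
    obtain ⟨k, hk, hke⟩ := (PySem.List.mem_enumerate_iff _ _ _).mp hp
    subst hpe; subst hke
    rw [List.length_map, PySem.List.length_enumerate]
    exact h.2 _ (List.getElem_mem hk)

theorem pvQueryEq (rows columns maxv : Int) (ans : List (List Int)) (q : Int × Int)
    (hsh : pvShape rows columns ans) :
    pvQueryA rows columns maxv ans q = pvQueryB rows columns maxv ans q ∧
    pvShape rows columns (pvQueryA rows columns maxv ans q) := by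
  simp only [pvQueryA, pvQueryB]
  by_cases hb : pvGet2 ans (q.1 - 1) (q.2 - 1) 0 = maxv
  · rw [if_pos hb, if_pos hb]
    have hvis0 : ∀ i j : Nat, pvN false (pvMkGrid rows columns false) i j = false := by
      intro i j; rw [pvN_mkGrid]; split <;> rfl
    have hIvis0 : ∀ R C : Int, pvI false (pvMkGrid rows columns false) R C = false := by
      intro R C; unfold pvI; split
      · exact hvis0 _ _
      · rfl
    have hinv0 : pvInv rows columns maxv ans ans (pvMkGrid rows columns false)
        PySem.Set.empty ([((q.1 - 1), (q.2 - 1))].take 0) ([((q.1 - 1), (q.2 - 1))].take 0) := by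
      refine ⟨hsh, pvShape_mkGrid rows columns false, ?_, ?_, ?_, ?_, ?_⟩
      · intro i j; rw [hvis0]; simp
      · intro p hp; cases hp
      · intro R C hRC
        constructor
        · intro h; cases h
        · rintro ⟨h, -⟩; rw [hIvis0] at h; cases h
      · intro p hp; cases hp
      · intro R C hRC h; rw [hIvis0] at h; cases h
    obtain ⟨ans', vis', comp', hA, hB, hsh', hans, hiff⟩ :=
      pvLoopEq rows columns maxv ans (pvFuel rows columns) ans (pvMkGrid rows columns false)
        [((q.1 - 1), (q.2 - 1))] PySem.Set.empty 0 hinv0 (by simp)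
        (by rw [pvFalseCount_mkGrid]; unfold pvFuel; simp; omega)
    rw [List.drop_zero] at hA
    rw [hA, hB]
    refine ⟨?_, hsh'⟩
    apply pvGrid_ext rows columns 0 _ _ hsh'
      (pvOut_shape rows columns ans (pvBoundary rows columns maxv ans comp') hsh)
    intro i j
    by_cases hin : i < rows.toNat ∧ j < columns.toNat
    · have hlen : i < ans.length := by have := hsh.1; omega
      have hrowlen : (ans[i]?.getD []).length = columns.toNat := by
        rw [List.getElem?_eq_getElem hlen, Option.getD_some]
        exact hsh.2 _ (List.getElem_mem hlen)
      have hinb : pvInb rows columns (i : Int) (j : Int) := by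
        unfold pvInb; omega
      have hiff' := hiff (i : Int) (j : Int) hinb
      rw [pvI_natCast] at hiff'
      rw [hans i j, pvOut_pt]
      congr 1
      have hbr : ((i : Int), (j : Int)) ∈ pvBoundary rows columns maxv ans comp' ↔
          (pvAdjTo comp' (i : Int) (j : Int) ∧ pvN 0 ans i j ≠ maxv) := by
        rw [mem_pvBoundary]
        constructor
        · rintro ⟨p, hp, d, hd, he, hi2, hm⟩
          obtain ⟨e1, e2⟩ := Prod.ext_iff.mp he
          refine ⟨⟨p, hp, d, hd, by omega, by omega⟩, ?_⟩
          rw [← pvI_natCast 0 ans i j]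
          exact hm
        · rintro ⟨⟨p, hp, d, hd, e1, e2⟩, hm⟩
          refine ⟨p, hp, d, hd, by rw [Prod.mk.injEq]; omega, hinb, ?_⟩
          rw [pvI_natCast]
          exact hm
      by_cases hA1 : pvN false vis' i j = true ∧ pvN 0 ans i j ≠ maxv
      · rw [if_pos hA1, if_pos ⟨hlen, by omega,
          (PySem.Set.contains_iff _ _).mpr (hbr.mpr ⟨hiff'.mp hA1.1, hA1.2⟩)⟩]
      · rw [if_neg hA1, if_neg ?_]
        rintro ⟨-, -, hcont⟩
        obtain ⟨hadj, hm⟩ := hbr.mp ((PySem.Set.contains_iff _ _).mp hcont)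
        exact hA1 ⟨hiff'.mpr hadj, hm⟩
    · rw [pvShape_pvN 0 hsh' i j hin, pvShape_pvN 0
        (pvOut_shape rows columns ans (pvBoundary rows columns maxv ans comp') hsh) i j hin]
  · rw [if_neg hb, if_neg hb]
    exact ⟨rfl, pvShape_pvSet2 _ _ _ hsh⟩

theorem pvFoldQueries (rows columns maxv : Int) :
    ∀ (qs : List (Int × Int)) (ans : List (List Int)), pvShape rows columns ans →
      qs.foldl (pvQueryA rows columns maxv) ans = qs.foldl (pvQueryB rows columns maxv) ans := by
  intro qs
  induction qs with
  | nil => intro ans _; rfl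
  | cons q qs ih =>
    intro ans hsh
    obtain ⟨heq, hsh'⟩ := pvQueryEq rows columns maxv ans q hsh
    simp only [List.foldl_cons]
    rw [← heq]
    exact ih _ hsh'

theorem pv_main : ∀ (rows columns max_virus : Int) (queries : List (Int × Int)),
    Pre_solution rows columns max_virus queries →
    solution rows columns max_virus queries = solution_alt rows columns max_virus queries := by
  intro rows columns max_virus queries _
  unfold solution solution_alt
  exact pvFoldQueries rows columns max_virus queries (pvMkGrid rows columns 0)
    (pvShape_mkGrid rows columns 0)

-- ===== VERDICT (by name: the statement is the Claim_ definition above) =====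
theorem solution_spec : Claim_equal_solution := by
  intro rows columns max_virus queries _ hpre
  unfold Spec_solution
  exact pv_main rows columns max_virus queries hpre
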